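-- pv_equiv track=rewrite | github.com/yeatonj/adventofcode2024 | day22/day22.py | find_secret
-- ===== SOURCE A (Python) =====
-- def mix(secret, mix_num):
--     return secret ^ mix_num
--
-- def prune(secret):
--     return secret % 16777216
--
-- def find_secret(secret, iter):
--     for i in range(iter):
--         # step 1
--         temp = secret
--         temp *= 64
--         secret = mix(secret, temp)
--         secret = prune(secret)
--         # Step 2
--         temp = secret
--         temp //= 32
--         secret = mix(secret,temp)
--         secret = prune(secret)
--         # Step 3
--         temp = secret
--         temp *= 2048
--         secret = mix(secret,temp)
--         secret = prune(secret)
--     return secret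
-- ===== SOURCE B (Python) =====
-- # One PRNG step is a GF(2)-linear map on the 24-bit state; B raises its 24x24
-- # bit-matrix to the iter-th power by repeated squaring: O(log iter) vs A's O(iter).
--
-- _MASK = 16777215
--
--
-- def _step(s):
--     s = (s ^ (s << 6)) & _MASK
--     s = s ^ (s >> 5)
--     return (s ^ (s << 11)) & _MASK
--
--
-- def _apply(m, v):
--     r = 0
--     for j in range(24):
--         if (v >> j) & 1:
--             r ^= m[j]
--     return r
--
--
-- def _mul(m2, m1):
--     return [_apply(m2, c) for c in m1]
--
--
-- def find_secret(secret, iter):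
--     if iter <= 0:
--         return secret
--     m = [_step(1 << j) for j in range(24)]
--     r = [1 << j for j in range(24)]
--     e = iter
--     while e:
--         if e & 1:
--             r = _mul(m, r)
--         m = _mul(m, m)
--         e >>= 1
--     return _apply(r, secret % 16777216)
-- ===== Notes on version B (the rewrite author's own statement) =====
-- stated objective: faster
-- what changed: B replaces A's iter-step loop by representing one PRNG step as a GF(2)-linear map on the 24-bit state (a 24x24 bit-matrix stored as 24 column bitmasks) and raising it to the iter-th power by repeated squaring, then applying it once to secret % 2^24.
import Mathlib
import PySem

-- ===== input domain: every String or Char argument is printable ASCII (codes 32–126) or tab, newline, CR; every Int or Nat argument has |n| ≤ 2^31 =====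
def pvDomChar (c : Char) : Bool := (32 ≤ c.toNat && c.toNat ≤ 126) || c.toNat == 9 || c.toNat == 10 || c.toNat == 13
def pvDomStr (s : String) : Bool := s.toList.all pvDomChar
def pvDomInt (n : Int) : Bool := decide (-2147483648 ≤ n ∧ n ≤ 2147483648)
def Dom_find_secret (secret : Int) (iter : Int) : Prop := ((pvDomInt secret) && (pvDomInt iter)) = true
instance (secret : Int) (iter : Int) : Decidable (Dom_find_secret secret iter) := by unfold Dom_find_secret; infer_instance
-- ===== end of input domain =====

-- B replaces A's per-iteration step loop by GF(2) bit-matrix exponentiation (repeated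
-- squaring) of the linear 24-bit step map, applied once to secret % 2^24 (objective: faster).


-- ===== PORT A =====
def mix (secret : Int) (mix_num : Int) : Int := PySem.Int.bxor secret mix_num

def prune (secret : Int) : Int := PySem.Int.mod secret 16777216

def find_secret (secret : Int) (iter : Int) : Int :=
  (PySem.List.pyRange 0 iter 1).foldl
    (fun secret _i =>
      -- step 1
      let temp := secret
      let temp := temp * 64
      let secret := mix secret temp
      let secret := prune secret
      -- Step 2
      let temp := secret
      let temp := PySem.Int.floordiv temp 32
      let secret := mix secret temp
      let secret := prune secret
      -- Step 3
      let temp := secret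
      let temp := temp * 2048
      let secret := mix secret temp
      prune secret)
    secret

-- ===== PORT B =====
def pvStep (s : Nat) : Nat :=
  let s1 := (s ^^^ (s <<< 6)) &&& 16777215
  let s2 := s1 ^^^ (s1 >>> 5)
  (s2 ^^^ (s2 <<< 11)) &&& 16777215

def pvApply (m : List Nat) (v : Nat) : Nat :=
  (List.range 24).foldl (fun r j => if (v >>> j) &&& 1 = 1 then r ^^^ m.getD j 0 else r) 0

def pvMul (m2 : List Nat) (m1 : List Nat) : List Nat := m1.map (pvApply m2)

def pvPowLoop (e : Nat) (m : List Nat) (r : List Nat) : List Nat :=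
  if h : e = 0 then r
  else pvPowLoop (e >>> 1) (pvMul m m) (if e &&& 1 = 1 then pvMul m r else r)
termination_by e
decreasing_by simpa [Nat.shiftRight_one] using Nat.div_lt_self (Nat.pos_of_ne_zero h) one_lt_two

def find_secret_alt (secret : Int) (iter : Int) : Int :=
  if iter ≤ 0 then secret
  else
    let m := (List.range 24).map (fun j => pvStep (1 <<< j))
    let r := (List.range 24).map (fun j => ((1 <<< j : Nat)))
    ((pvApply (pvPowLoop iter.toNat m r) ((PySem.Int.mod secret 16777216).toNat) : Nat) : Int)

-- ===== PRECONDITION & SPEC =====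
def Spec_find_secret (secret : Int) (iter : Int) (out : Int) : Prop := out = find_secret_alt secret iter
instance (secret : Int) (iter : Int) (out : Int) : Decidable (Spec_find_secret secret iter out) := by unfold Spec_find_secret; infer_instance

-- ===== CLAIM (what is proved, stated in full; the proofs are below) =====
def Claim_equal_find_secret : Prop := ∀ (secret : Int) (iter : Int), Dom_find_secret secret iter → Spec_find_secret secret iter (find_secret secret iter)

-- ===== LEMMAS AND PROOFS =====

-- ---- generic Nat bit lemmas ----
theorem pv_mod_xor (x y t : Nat) : (x ^^^ y) % 2^t = (x % 2^t) ^^^ (y % 2^t) := by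
  apply Nat.eq_of_testBit_eq
  intro i
  simp only [Nat.testBit_mod_two_pow, Nat.testBit_xor]
  cases h : decide (i < t) <;> simp

theorem pv_shiftLeft_xor (a b k : Nat) : (a ^^^ b) <<< k = (a <<< k) ^^^ (b <<< k) := by
  apply Nat.eq_of_testBit_eq
  intro i
  simp only [Nat.testBit_shiftLeft, Nat.testBit_xor]
  cases h : decide (k ≤ i) <;> simp

theorem pv_shiftRight_xor (a b k : Nat) : (a ^^^ b) >>> k = (a >>> k) ^^^ (b >>> k) := by
  apply Nat.eq_of_testBit_eq
  intro i
  simp [Nat.testBit_shiftRight, Nat.testBit_xor]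

theorem pv_mask_sub_eq_xor (t y : Nat) (h : y < 2^t) : 2^t - 1 - y = (2^t - 1) ^^^ y := by
  induction t generalizing y with
  | zero => interval_cases y; rfl
  | succ t ih =>
    have h2 : y / 2 < 2^t := by omega
    have hih := ih (y/2) h2
    have hb := Nat.div_add_mod y 2
    have hx : (2^(t+1) - 1) ^^^ y = 2 * ((2^t - 1) ^^^ (y/2)) + (1 - y % 2) := by
      have e1 : 2^(t+1) - 1 = Nat.bit true (2^t - 1) := by simp [Nat.bit]; omega
      have e2 : y = Nat.bit (y % 2 == 1) (y/2) := by
        rcases Nat.mod_two_eq_zero_or_one y with h0 | h0 <;> simp [Nat.bit, h0] <;> omega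
      rw [e1]
      conv_lhs => rw [e2]
      rw [Nat.xor_bit]
      rcases Nat.mod_two_eq_zero_or_one y with h0 | h0 <;> simp [Nat.bit, h0]
    omega

theorem pv_xor_two_pow_of_lt (n x : Nat) (h : x < 2^n) : x ^^^ 2^n = x + 2^n := by
  induction n generalizing x with
  | zero => interval_cases x; rfl
  | succ n ih =>
    have h2 : x / 2 < 2^n := by omega
    have hih := ih (x/2) h2
    have hb := Nat.div_add_mod x 2
    have e1 : (2:Nat)^(n+1) = Nat.bit false (2^n) := by simp [Nat.bit]; ring
    have e2 : x = Nat.bit (x % 2 == 1) (x/2) := by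
      rcases Nat.mod_two_eq_zero_or_one x with h0 | h0 <;> simp [Nat.bit, h0] <;> omega
    conv_lhs => rw [e2, e1]
    rw [Nat.xor_bit]
    rcases Nat.mod_two_eq_zero_or_one x with h0 | h0 <;> simp [Nat.bit, h0] <;> omega

-- ---- pvStep: bound and GF(2)-linearity ----
theorem pvStep_lt (s : Nat) : pvStep s < 2^24 := by
  have := Nat.and_le_right (n := ((((s ^^^ (s <<< 6)) &&& 16777215) ^^^ (((s ^^^ (s <<< 6)) &&& 16777215) >>> 5)) ^^^ ((((s ^^^ (s <<< 6)) &&& 16777215) ^^^ (((s ^^^ (s <<< 6)) &&& 16777215) >>> 5)) <<< 11))) (m := 16777215)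
  simp only [pvStep]
  omega

def pvF1 (s : Nat) : Nat := (s ^^^ (s <<< 6)) &&& 16777215
def pvF2 (s : Nat) : Nat := s ^^^ (s >>> 5)
def pvF3 (s : Nat) : Nat := (s ^^^ (s <<< 11)) &&& 16777215

theorem pvStep_eq_comp (s : Nat) : pvStep s = pvF3 (pvF2 (pvF1 s)) := rfl

theorem pvF1_linear (a b : Nat) : pvF1 (a ^^^ b) = pvF1 a ^^^ pvF1 b := by
  simp only [pvF1, pv_shiftLeft_xor, Nat.and_xor_distrib_right]
  simp [Nat.xor_assoc, Nat.xor_comm, Nat.xor_left_comm]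

theorem pvF2_linear (a b : Nat) : pvF2 (a ^^^ b) = pvF2 a ^^^ pvF2 b := by
  simp only [pvF2, pv_shiftRight_xor]
  simp [Nat.xor_assoc, Nat.xor_comm, Nat.xor_left_comm]

theorem pvF3_linear (a b : Nat) : pvF3 (a ^^^ b) = pvF3 a ^^^ pvF3 b := by
  simp only [pvF3, pv_shiftLeft_xor, Nat.and_xor_distrib_right]
  simp [Nat.xor_assoc, Nat.xor_comm, Nat.xor_left_comm]

theorem pvStep_linear (a b : Nat) : pvStep (a ^^^ b) = pvStep a ^^^ pvStep b := by
  simp [pvStep_eq_comp, pvF1_linear, pvF2_linear, pvF3_linear]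

def pvAppAux (m : List Nat) (v : Nat) (L : List Nat) (r : Nat) : Nat :=
  L.foldl (fun r j => if (v >>> j) &&& 1 = 1 then r ^^^ m.getD j 0 else r) r

theorem pvAppAux_acc (m : List Nat) (v : Nat) (L : List Nat) (r : Nat) :
    pvAppAux m v L r = r ^^^ pvAppAux m v L 0 := by
  induction L generalizing r with
  | nil => simp [pvAppAux]
  | cons j L ih =>
    simp only [pvAppAux, List.foldl_cons]
    by_cases h : (v >>> j) &&& 1 = 1 <;> simp only [h, ite_true, ite_false]
    · rw [show (List.foldl _ (r ^^^ m.getD j 0) L : Nat) = pvAppAux m v L (r ^^^ m.getD j 0) from rfl,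
         show (List.foldl _ (0 ^^^ m.getD j 0) L : Nat) = pvAppAux m v L (0 ^^^ m.getD j 0) from rfl,
         ih, ih (0 ^^^ m.getD j 0)]
      simp [Nat.xor_assoc]
    · exact ih r

theorem pvAppAux_zero (m : List Nat) (L : List Nat) (r : Nat) : pvAppAux m 0 L r = r := by
  induction L generalizing r with
  | nil => rfl
  | cons j L ih =>
    simp only [pvAppAux, List.foldl_cons, Nat.zero_shiftRight, Nat.zero_and]
    simpa using ih r

theorem pv_bit_xor (a b j : Nat) :
    ((a ^^^ b) >>> j) &&& 1 = (((a >>> j) &&& 1) ^^^ ((b >>> j) &&& 1)) := by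
  have h : (a ^^^ b) >>> j = (a >>> j) ^^^ (b >>> j) := by
    apply Nat.eq_of_testBit_eq; intro i
    simp [Nat.testBit_shiftRight, Nat.testBit_xor]
  rw [h, Nat.and_xor_distrib_right]

theorem pvAppAux_linear (m : List Nat) (a b : Nat) (L : List Nat) :
    pvAppAux m (a ^^^ b) L 0 = pvAppAux m a L 0 ^^^ pvAppAux m b L 0 := by
  induction L with
  | nil => simp [pvAppAux]
  | cons j L ih =>
    have step : ∀ v : Nat, pvAppAux m v (j :: L) 0
        = (if (v >>> j) &&& 1 = 1 then m.getD j 0 else 0) ^^^ pvAppAux m v L 0 := by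
      intro v
      simp only [pvAppAux, List.foldl_cons]
      by_cases h : (v >>> j) &&& 1 = 1 <;> simp only [h, ite_true, ite_false, Nat.zero_xor]
      exact pvAppAux_acc m v L _
    rw [step, step, step, ih]
    have hb := pv_bit_xor a b j
    generalize hA : pvAppAux m a L 0 = A at *
    generalize hB : pvAppAux m b L 0 = B at *
    by_cases h1 : (a >>> j) &&& 1 = 1 <;> by_cases h2 : (b >>> j) &&& 1 = 1
    · rw [h1, h2, Nat.xor_self] at hb
      rw [if_neg (by omega), if_pos h1, if_pos h2, Nat.zero_xor]
      simp [Nat.xor_assoc, Nat.xor_comm, Nat.xor_left_comm, Nat.xor_cancel_left]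
    · rw [h1] at hb
      have h2' : (b >>> j) &&& 1 = 0 := by have : (b >>> j) &&& 1 ≤ 1 := Nat.and_le_right; omega
      rw [h2', Nat.xor_zero] at hb
      simp only [h1, h2, hb, ite_true, ite_false, Nat.zero_xor]
      rw [← Nat.xor_assoc]
    · have h1' : (a >>> j) &&& 1 = 0 := by have : (a >>> j) &&& 1 ≤ 1 := Nat.and_le_right; omega
      rw [h1', h2, Nat.zero_xor] at hb
      simp only [h1, h2, hb, ite_true, ite_false, Nat.zero_xor]
      simp [Nat.xor_assoc, Nat.xor_comm, Nat.xor_left_comm]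
    · have h1' : (a >>> j) &&& 1 = 0 := by have : (a >>> j) &&& 1 ≤ 1 := Nat.and_le_right; omega
      have h2' : (b >>> j) &&& 1 = 0 := by have : (b >>> j) &&& 1 ≤ 1 := Nat.and_le_right; omega
      rw [h1', h2', Nat.xor_self] at hb
      rw [if_neg h1, if_neg h2, if_neg (by omega), Nat.zero_xor, Nat.zero_xor, Nat.zero_xor]

theorem pvApply_eq_aux (m : List Nat) (v : Nat) : pvApply m v = pvAppAux m v (List.range 24) 0 := rfl

theorem pvApply_zero (m : List Nat) : pvApply m 0 = 0 := by
  rw [pvApply_eq_aux, pvAppAux_zero]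

theorem pvApply_linear (m : List Nat) (a b : Nat) :
    pvApply m (a ^^^ b) = pvApply m a ^^^ pvApply m b := by
  simp [pvApply_eq_aux, pvAppAux_linear]

theorem pv_getD_map (g : Nat → Nat) (hg0 : g 0 = 0) (m : List Nat) (j : Nat) :
    (m.map g).getD j 0 = g (m.getD j 0) := by
  by_cases h : j < m.length
  · simp [List.getD, List.getElem?_map, List.getElem?_eq_getElem h]
  · rw [List.getD_eq_default, List.getD_eq_default, hg0] <;> simpa using Nat.le_of_not_lt h

theorem pvAppAux_hom (g : Nat → Nat) (hg0 : g 0 = 0)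
    (hglin : ∀ x y, g (x ^^^ y) = g x ^^^ g y)
    (m : List Nat) (v : Nat) (L : List Nat) :
    pvAppAux (m.map g) v L 0 = g (pvAppAux m v L 0) := by
  induction L with
  | nil => simp [pvAppAux, hg0]
  | cons j L ih =>
    have step : ∀ (mm : List Nat), pvAppAux mm v (j :: L) 0
        = (if (v >>> j) &&& 1 = 1 then mm.getD j 0 else 0) ^^^ pvAppAux mm v L 0 := by
      intro mm
      simp only [pvAppAux, List.foldl_cons]
      by_cases h : (v >>> j) &&& 1 = 1 <;> simp only [h, ite_true, ite_false, Nat.zero_xor]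
      exact pvAppAux_acc mm v L _
    rw [step, step, ih, pv_getD_map g hg0]
    by_cases h : (v >>> j) &&& 1 = 1
    · rw [if_pos h, if_pos h, hglin]
    · rw [if_neg h, if_neg h, Nat.zero_xor, Nat.zero_xor]

theorem pvApply_map (g : Nat → Nat) (hg0 : g 0 = 0)
    (hglin : ∀ x y, g (x ^^^ y) = g x ^^^ g y) (m : List Nat) (v : Nat) :
    pvApply (m.map g) v = g (pvApply m v) := by
  simp [pvApply_eq_aux, pvAppAux_hom g hg0 hglin]

theorem pvApply_mul (m2 m1 : List Nat) (v : Nat) :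
    pvApply (pvMul m2 m1) v = pvApply m2 (pvApply m1 v) :=
  pvApply_map (pvApply m2) (pvApply_zero m2) (fun x y => pvApply_linear m2 x y) m1 v

-- ---- the identity and base matrices ----
theorem pv_id_fold (n v : Nat) (hn : n ≤ 24) :
    (List.range n).foldl (fun r j => if (v >>> j) &&& 1 = 1
      then r ^^^ (((List.range 24).map (fun j => (1 <<< j : Nat))).getD j 0) else r) 0 = v % 2^n := by
  induction n with
  | zero => simp [Nat.mod_one]
  | succ n ih =>
    set I : List Nat := (List.range 24).map (fun j => (1 <<< j : Nat)) with hI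
    rw [List.range_succ, List.foldl_append, ih (by omega)]
    have hget : ((List.range 24).map (fun j => (1 <<< j : Nat))).getD n 0 = 2^n := by
      have hn24 : n < 24 := by omega
      simp [List.getD, List.getElem?_map, List.getElem?_range, hn24, Nat.one_shiftLeft]
    have hcond : (v >>> n) &&& 1 = (v / 2^n) % 2 := by
      rw [Nat.shiftRight_eq_div_pow, Nat.and_one_is_mod]
    have hm : v % 2^(n+1) = v % 2^n + 2^n * ((v / 2^n) % 2) := by
      rw [Nat.pow_succ, Nat.mod_mul]
    have hlt : v % 2^n < 2^n := Nat.mod_lt _ (Nat.two_pow_pos n)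
    have hget' : I.getD n 0 = 2^n := hget
    simp only [List.foldl_cons, List.foldl_nil, hget', hcond]
    by_cases h : (v / 2^n) % 2 = 1
    · rw [h, mul_one] at hm
      rw [if_pos h, pv_xor_two_pow_of_lt n _ hlt]; omega
    · have h0 : (v / 2^n) % 2 = 0 := by omega
      rw [h0, mul_zero] at hm
      rw [if_neg h]; omega

theorem pvApply_id (v : Nat) (h : v < 2^24) :
    pvApply ((List.range 24).map (fun j => (1 <<< j : Nat))) v = v := by
  rw [pvApply_eq_aux]
  have := pv_id_fold 24 v (by omega)
  rw [show pvAppAux ((List.range 24).map (fun j => (1 <<< j : Nat))) v (List.range 24) 0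
      = (List.range 24).foldl (fun r j => if (v >>> j) &&& 1 = 1
        then r ^^^ (((List.range 24).map (fun j => (1 <<< j : Nat))).getD j 0) else r) 0 from rfl,
      this, Nat.mod_eq_of_lt h]

theorem pvApply_base (v : Nat) (h : v < 2^24) :
    pvApply ((List.range 24).map (fun j => pvStep (1 <<< j))) v = pvStep v := by
  have hmm : (List.range 24).map (fun j => pvStep (1 <<< j))
      = ((List.range 24).map (fun j => (1 <<< j : Nat))).map pvStep := by
    rw [List.map_map]; rfl
  rw [hmm, pvApply_map pvStep rfl pvStep_linear, pvApply_id v h]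

-- ---- the squaring loop ----
theorem pv_iterate_split (f : Nat → Nat) (e : Nat) (x : Nat) :
    f^[e] x = (f ∘ f)^[e >>> 1] (f^[e &&& 1] x) := by
  have h1 : e >>> 1 = e / 2 := Nat.shiftRight_one e
  have h2 : e &&& 1 = e % 2 := Nat.and_one_is_mod e
  have h3 : e = 2 * (e / 2) + e % 2 := by omega
  rw [h1, h2]
  conv_lhs => rw [h3]
  rw [Function.iterate_add_apply, Function.iterate_mul]
  have h4 : f^[2] = f ∘ f := by
    funext y; simp [Function.comp]
  rw [h4]

theorem pvPowLoop_correct (e : Nat) (m r : List Nat) (fm fr : Nat → Nat)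
    (hm : ∀ v, v < 2^24 → pvApply m v = fm v)
    (hr : ∀ v, v < 2^24 → pvApply r v = fr v)
    (hmb : ∀ v, v < 2^24 → fm v < 2^24)
    (hrb : ∀ v, v < 2^24 → fr v < 2^24) :
    ∀ v, v < 2^24 → pvApply (pvPowLoop e m r) v = fm^[e] (fr v) := by
  induction e using Nat.strongRecOn generalizing m r fm fr with
  | ind e ih =>
    intro v hv
    rw [pvPowLoop]
    by_cases he : e = 0
    · simp only [he, dite_true]
      simp [hr v hv, he]
    · simp only [he, dite_false]
      have hlt : e >>> 1 < e := by
        simpa [Nat.shiftRight_one] using Nat.div_lt_self (Nat.pos_of_ne_zero he) one_lt_two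
      have hm2 : ∀ w, w < 2^24 → pvApply (pvMul m m) w = (fm ∘ fm) w := by
        intro w hw; rw [pvApply_mul, hm w hw, hm _ (hmb w hw)]; rfl
      have hm2b : ∀ w, w < 2^24 → (fm ∘ fm) w < 2^24 := by
        intro w hw; exact hmb _ (hmb w hw)
      by_cases hb : e &&& 1 = 1
      · simp only [hb, ite_true]
        have hr2 : ∀ w, w < 2^24 → pvApply (pvMul m r) w = (fm ∘ fr) w := by
          intro w hw; rw [pvApply_mul, hr w hw, hm _ (hrb w hw)]; rfl
        have hr2b : ∀ w, w < 2^24 → (fm ∘ fr) w < 2^24 := by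
          intro w hw; exact hmb _ (hrb w hw)
        rw [ih _ hlt _ _ _ _ hm2 hr2 hm2b hr2b v hv]
        rw [pv_iterate_split fm e (fr v), hb]
        simp [Function.comp]
      · simp only [hb, ite_false]
        have hb0 : e &&& 1 = 0 := by
          have : e &&& 1 ≤ 1 := Nat.and_le_right; omega
        rw [ih _ hlt _ _ _ _ hm2 hr hm2b hrb v hv]
        rw [pv_iterate_split fm e (fr v), hb0]
        simp

-- ---- Int-side bridge (two's-complement xor vs Nat xor modulo 2^t) ----
theorem pv_neg_emod (m t : Nat) :
    (-(m : Int) - 1).emod (2^t) = ((2^t - 1 - m % 2^t : Nat) : Int) := by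
  have hlt : m % 2^t < 2^t := Nat.mod_lt _ (Nat.two_pow_pos t)
  have hp : ((2^t : Nat) : Int) = (2:Int)^t := by push_cast; ring
  have hm : (2^t:Int) * ((m / 2^t : Nat) : Int) + ((m % 2^t : Nat) : Int) = (m : Int) := by
    exact_mod_cast Nat.div_add_mod m (2^t)
  have hcast : ((2^t - 1 - m % 2^t : Nat) : Int) = 2^t - 1 - ((m % 2^t : Nat) : Int) := by
    rw [← hp]; omega
  have hdecomp : (-(m : Int) - 1)
      = ((2^t - 1 - m % 2^t : Nat) : Int) + (-(((m / 2^t : Nat) : Nat) : Int) - 1) * 2^t := by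
    rw [hcast]; linear_combination hm
  rw [hdecomp]
  rw [show ((((2^t - 1 - m % 2^t : Nat) : Int)) + (-(((m / 2^t : Nat) : Nat) : Int) - 1) * 2^t).emod (2^t)
      = ((((2^t - 1 - m % 2^t : Nat) : Int)) + (-(((m / 2^t : Nat) : Nat) : Int) - 1) * 2^t) % ((2:Int)^t) from rfl,
     Int.add_mul_emod_self_right]
  apply Int.emod_eq_of_lt
  · rw [hcast]; omega
  · rw [hcast]
    have h2 : (0:Int) < 2^t := by positivity
    omega

theorem pv_natCast_emod (x t : Nat) :
    ((x : Int)).emod (2^t) = ((x % 2^t : Nat) : Int) := by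
  have hp : ((2^t : Nat) : Int) = (2:Int)^t := by push_cast; ring
  rw [show ((x : Int)).emod ((2:Int)^t) = (x : Int) % ((2:Int)^t) from rfl, ← hp]; omega

theorem pv_emod_toNat_natCast (x t : Nat) :
    (((x : Int)).emod (2^t)).toNat = x % 2^t := by
  rw [pv_natCast_emod, Int.toNat_natCast]

theorem pv_neg_emod_toNat (m t : Nat) :
    ((-(m : Int) - 1).emod (2^t)).toNat = 2^t - 1 - m % 2^t := by
  rw [pv_neg_emod, Int.toNat_natCast]

theorem pv_xor_shuffle1 (M x y : Nat) : M ^^^ (x ^^^ y) = x ^^^ (M ^^^ y) := by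
  rw [← Nat.xor_assoc, Nat.xor_comm M x, Nat.xor_assoc]

theorem pv_bxor_emod (a b : Int) (t : Nat) :
    (PySem.Int.bxor a b).emod (2^t) = (((a.emod (2^t)).toNat ^^^ (b.emod (2^t)).toNat : Nat) : Int) := by
  rw [PySem.Int.bxor.eq_1]
  have hlt : ∀ x : Nat, x % 2^t < 2^t := fun x => Nat.mod_lt _ (Nat.two_pow_pos t)
  by_cases ha : 0 ≤ a <;> by_cases hb : 0 ≤ b
  · rw [if_pos ha, if_pos hb]
    have ha' : a = ((a.toNat : Nat) : Int) := by omega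
    have hb' : b = ((b.toNat : Nat) : Int) := by omega
    rw [pv_natCast_emod, pv_mod_xor]
    conv_rhs => rw [ha', hb']
    rw [pv_emod_toNat_natCast, pv_emod_toNat_natCast]
  · rw [if_pos ha, if_neg hb]
    have ha' : a = ((a.toNat : Nat) : Int) := by omega
    have hb' : b = -(((-b-1).toNat : Nat) : Int) - 1 := by omega
    rw [pv_neg_emod]
    conv_rhs => rw [ha', hb']
    rw [pv_emod_toNat_natCast, pv_neg_emod_toNat, pv_mod_xor]
    congr 1
    rw [pv_mask_sub_eq_xor t _ (Nat.xor_lt_two_pow (hlt _) (hlt _)),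
        pv_mask_sub_eq_xor t _ (hlt _)]
    exact pv_xor_shuffle1 _ _ _
  · rw [if_neg ha, if_pos hb]
    have ha' : a = -(((-a-1).toNat : Nat) : Int) - 1 := by omega
    have hb' : b = ((b.toNat : Nat) : Int) := by omega
    rw [pv_neg_emod]
    conv_rhs => rw [ha', hb']
    rw [pv_neg_emod_toNat, pv_emod_toNat_natCast, pv_mod_xor]
    congr 1
    rw [pv_mask_sub_eq_xor t _ (Nat.xor_lt_two_pow (hlt _) (hlt _)),
        pv_mask_sub_eq_xor t _ (hlt _)]
    rw [Nat.xor_assoc]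
  · rw [if_neg ha, if_neg hb]
    have ha' : a = -(((-a-1).toNat : Nat) : Int) - 1 := by omega
    have hb' : b = -(((-b-1).toNat : Nat) : Int) - 1 := by omega
    rw [pv_natCast_emod, pv_mod_xor]
    conv_rhs => rw [ha', hb']
    rw [pv_neg_emod_toNat, pv_neg_emod_toNat]
    congr 1
    rw [pv_mask_sub_eq_xor t _ (hlt _), pv_mask_sub_eq_xor t _ (hlt _)]
    simp [Nat.xor_assoc, Nat.xor_comm, Nat.xor_left_comm, Nat.xor_cancel_left, Nat.xor_self,
      Nat.zero_xor]

-- ---- A's loop body equals pvStep on the reduced state ----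
def pvStepA (s : Int) : Int :=
  let s1 := prune (mix s (s * 64))
  let s2 := prune (mix s1 (PySem.Int.floordiv s1 32))
  prune (mix s2 (s2 * 2048))

theorem pv_mod_is_emod (a : Int) : PySem.Int.mod a 16777216 = a.emod (2^24) := by
  rw [PySem.Int.mod_eq_emod_of_pos (by norm_num)]
  rw [show ((2:Int)^24) = 16777216 by norm_num]
  rfl

theorem pvStepA_eq (s : Int) : pvStepA s = ((pvStep ((s.emod (2^24)).toNat) : Nat) : Int) := by
  have hmask : (16777215 : Nat) = 2^24 - 1 := by norm_num
  set n : Nat := (s.emod (2^24)).toNat with hn_def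
  have hn : n < 2^24 := by
    have h1 : (0:Int) ≤ s % 2^24 := Int.emod_nonneg s (by norm_num)
    have h2 : s % 2^24 < 2^24 := Int.emod_lt_of_pos s (by norm_num)
    rw [hn_def, show s.emod (2^24) = s % (2^24) from rfl]
    omega
  have hs : s.emod (2^24) = (n : Int) := by
    rw [hn_def]
    exact (Int.toNat_of_nonneg (Int.emod_nonneg s (by norm_num))).symm
  have h64 : (s * 64).emod (2^24) = (((n*64) % 2^24 : Nat) : Int) := by
    rw [show (s*64).emod (2^24) = (s*64) % (2^24) from rfl, Int.mul_emod,
        show s % (2^24) = (n:Int) from hs, show (64:Int) % 2^24 = 64 by norm_num,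
        show ((n:Int)) * 64 = ((n*64 : Nat) : Int) by push_cast; ring,
        show ((n*64 : Nat) : Int) % (2^24) = (((n*64 : Nat) : Int)).emod (2^24) from rfl,
        pv_natCast_emod]
  set m1 : Nat := n ^^^ (n*64) % 2^24 with hm1_def
  have hm1 : m1 < 2^24 :=
    Nat.xor_lt_two_pow hn (Nat.mod_lt _ (Nat.two_pow_pos 24))
  set m2 : Nat := m1 ^^^ m1 / 32 with hm2_def
  have hm2 : m2 < 2^24 :=
    Nat.xor_lt_two_pow hm1 (lt_of_le_of_lt (Nat.div_le_self m1 32) hm1)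
  have a1 : prune (mix s (s * 64)) = ((m1 : Nat) : Int) := by
    rw [show mix s (s*64) = PySem.Int.bxor s (s*64) from rfl,
        show prune (PySem.Int.bxor s (s*64)) = (PySem.Int.bxor s (s*64)).emod (2^24) from
          pv_mod_is_emod _,
        pv_bxor_emod, ← hn_def, h64, Int.toNat_natCast]
  have a2 : prune (mix ((m1 : Nat) : Int) (PySem.Int.floordiv ((m1 : Nat) : Int) 32))
      = ((m2 : Nat) : Int) := by
    rw [show (32:Int) = ((32:Nat):Int) from rfl, PySem.Int.floordiv_natCast,
        show mix ((m1 : Nat) : Int) (((m1/32 : Nat) : Int)) = PySem.Int.bxor ((m1 : Nat) : Int) (((m1/32 : Nat) : Int)) from rfl,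
        PySem.Int.bxor_natCast,
        show prune (((m1 ^^^ m1/32 : Nat)) : Int) = (((m1 ^^^ m1/32 : Nat)) : Int).emod (2^24) from
          pv_mod_is_emod _,
        pv_natCast_emod, Nat.mod_eq_of_lt (by rw [hm2_def] at hm2; exact hm2)]
  have a3 : prune (mix ((m2 : Nat) : Int) (((m2 : Nat) : Int) * 2048))
      = ((((m2 ^^^ m2*2048) % 2^24 : Nat) : Nat) : Int) := by
    rw [show ((m2 : Nat) : Int) * 2048 = ((m2*2048 : Nat) : Int) by push_cast; ring,
        show mix ((m2 : Nat) : Int) ((m2*2048 : Nat) : Int) = PySem.Int.bxor ((m2 : Nat) : Int) ((m2*2048 : Nat) : Int) from rfl,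
        PySem.Int.bxor_natCast,
        show prune (((m2 ^^^ m2*2048 : Nat)) : Int) = (((m2 ^^^ m2*2048 : Nat)) : Int).emod (2^24) from
          pv_mod_is_emod _,
        pv_natCast_emod]
  have hS1 : pvF1 n = m1 := by
    rw [pvF1, hm1_def, Nat.shiftLeft_eq, show (2:Nat)^6 = 64 by norm_num, hmask,
        Nat.and_two_pow_sub_one_eq_mod, pv_mod_xor, Nat.mod_eq_of_lt hn]
  have hS2 : pvF2 m1 = m2 := by
    rw [pvF2, hm2_def, Nat.shiftRight_eq_div_pow, show (2:Nat)^5 = 32 by norm_num]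
  have hS3 : pvF3 m2 = (m2 ^^^ m2*2048) % 2^24 := by
    rw [pvF3, Nat.shiftLeft_eq, show (2:Nat)^11 = 2048 by norm_num, hmask,
        Nat.and_two_pow_sub_one_eq_mod]
  rw [show pvStepA s = prune (mix (prune (mix (prune (mix s (s*64)))
        (PySem.Int.floordiv (prune (mix s (s*64))) 32)))
        ((prune (mix (prune (mix s (s*64))) (PySem.Int.floordiv (prune (mix s (s*64))) 32))) * 2048)) from rfl]
  rw [a1, a2, a3, pvStep_eq_comp, hS1, hS2, hS3]

theorem pv_foldl_const (f : Int → Int) (L : List Int) (x : Int) :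
    L.foldl (fun s _ => f s) x = f^[L.length] x := by
  induction L generalizing x with
  | nil => rfl
  | cons a L ih => simp [List.foldl_cons, ih, Function.iterate_succ_apply]

theorem find_secret_iterate (secret iter : Int) :
    find_secret secret iter = pvStepA^[iter.toNat] secret := by
  rw [show find_secret secret iter
      = (PySem.List.pyRange 0 iter 1).foldl (fun s _ => pvStepA s) secret from rfl,
     pv_foldl_const pvStepA, PySem.List.length_pyRange_one]
  norm_num

theorem pv_iter_bound (k u : Nat) (hu : u < 2^24) : pvStep^[k] u < 2^24 := by
  induction k generalizing u with
  | zero => simpa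
  | succ k ih => rw [Function.iterate_succ_apply]; exact ih _ (pvStep_lt u)

theorem pv_stepA_iter (k : Nat) (s : Int) :
    pvStepA^[k+1] s = ((pvStep^[k] (pvStep ((s.emod (2^24)).toNat)) : Nat) : Int) := by
  induction k generalizing s with
  | zero => simpa using pvStepA_eq s
  | succ k ih =>
    rw [Function.iterate_succ_apply', ih, pvStepA_eq]
    have hw : pvStep^[k] (pvStep ((s.emod (2^24)).toNat)) < 2^24 :=
      pv_iter_bound k _ (pvStep_lt _)
    rw [pv_emod_toNat_natCast, Nat.mod_eq_of_lt hw]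
    rw [show pvStep (pvStep^[k] (pvStep ((s.emod (2^24)).toNat)))
        = pvStep^[k+1] (pvStep ((s.emod (2^24)).toNat)) from
        (Function.iterate_succ_apply' pvStep k _).symm]

-- ===== VERDICT (by name: the statement is the Claim_ definition above) =====
theorem find_secret_spec : Claim_equal_find_secret := by
  intro secret iter _
  unfold Spec_find_secret find_secret_alt
  by_cases hit : iter ≤ 0
  · rw [if_pos hit, find_secret_iterate, Int.toNat_of_nonpos hit, Function.iterate_zero_apply]
  · rw [if_neg hit, find_secret_iterate]
    dsimp only
    have hn : 1 ≤ iter.toNat := by omega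
    set u : Nat := (PySem.Int.mod secret 16777216).toNat with hu
    have hue : u = (secret.emod (2^24)).toNat := by rw [hu, pv_mod_is_emod]
    have hub : u < 2^24 := by
      rw [hue]
      have h1 : (0:Int) ≤ secret % (2^24) := Int.emod_nonneg secret (by norm_num)
      have h2 : secret % (2^24) < 2^24 := Int.emod_lt_of_pos secret (by norm_num)
      rw [show secret.emod (2^24) = secret % (2^24) from rfl]
      omega
    rw [pvPowLoop_correct iter.toNat _ _ pvStep id
        (fun v hv => pvApply_base v hv) (fun v hv => by simpa using pvApply_id v hv)
        (fun v _ => pvStep_lt v) (fun v hv => by simpa using hv) u hub]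
    rw [show iter.toNat = (iter.toNat - 1) + 1 by omega, pv_stepA_iter, ← hue,
        Function.iterate_succ_apply]
    rfl
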